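-- pv_equiv track=rewrite | github.com/AndrewKeefe918/Secure-Backscatter-IoT | receiver/pluto_receiver_gui.py | majority_decode_triplets
-- ===== SOURCE A (Python) =====
-- REPETITION_CHIPS = 3
--
-- def majority_decode_triplets(chips: list[int], start_offset: int) -> list[int]:
--     decoded: list[int] = []
--     idx = start_offset
--     while idx + REPETITION_CHIPS <= len(chips):
--         triplet = chips[idx : idx + REPETITION_CHIPS]
--         decoded.append(1 if sum(triplet) >= 2 else 0)
--         idx += REPETITION_CHIPS
--     return decoded
-- ===== SOURCE B (Python) =====
-- def majority_decode_triplets(chips: list[int], start_offset: int) -> list[int]: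
--     n = (len(chips) - start_offset) // 3
--     if n <= 0:
--         return []
--     sums = [0] * n
--     for i, x in enumerate(chips[start_offset : start_offset + 3 * n]):
--         sums[i // 3] += x
--     return [1 if s >= 2 else 0 for s in sums]
-- ===== Notes on version B (the rewrite author's own statement) =====
-- stated objective: alternative
-- what changed: Instead of A's single pass that slices and emits one majority bit per window, B first computes the number of complete triplets in closed form, accumulates per-triplet sums into a pre-allocated table keyed by i//3 in one scan, and then thresholds the table in a second pass.
-- outside the precondition, e.g. on majority_decode_triplets([1, 1, 0, 1], -3): A returns [0, 1], B returns [0, 0]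
import Mathlib
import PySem

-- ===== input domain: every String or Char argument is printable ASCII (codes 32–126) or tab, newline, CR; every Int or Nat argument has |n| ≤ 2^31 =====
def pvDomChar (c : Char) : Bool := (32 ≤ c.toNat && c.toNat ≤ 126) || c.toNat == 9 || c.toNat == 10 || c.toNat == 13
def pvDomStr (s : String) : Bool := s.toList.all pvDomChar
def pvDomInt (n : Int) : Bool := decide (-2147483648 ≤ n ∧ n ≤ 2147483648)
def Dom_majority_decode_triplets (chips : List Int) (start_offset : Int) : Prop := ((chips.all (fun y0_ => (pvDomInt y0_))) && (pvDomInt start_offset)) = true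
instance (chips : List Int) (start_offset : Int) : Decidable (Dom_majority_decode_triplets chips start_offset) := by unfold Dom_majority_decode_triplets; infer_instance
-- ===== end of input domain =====

-- B replaces A's single slice-and-emit loop by a staged computation: the number of
-- complete triplets in closed form, one scan accumulating per-triplet sums into a
-- pre-allocated table keyed by i//3, then a thresholding pass — alternative, same cost.
-- Pre_ excludes negative start_offset, where Python's negative-slice semantics give both
-- programs accidental, unspecified wraparound results.


-- ===== PORT A =====
-- the while loop: while idx + 3 <= len(chips): decoded.append(...); idx += 3
def majorityLoopA (chips : List Int) (idx : Int) (decoded : List Int) : List Int :=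
  if _h : idx + 3 ≤ (chips.length : Int) then
    majorityLoopA chips (idx + 3)
      (decoded ++ [if 2 ≤ (PySem.List.slice chips (some idx) (some (idx + 3))).sum then (1 : Int) else 0])
  else decoded
termination_by ((chips.length : Int) + 3 - idx).toNat
decreasing_by omega

def majority_decode_triplets (chips : List Int) (start_offset : Int) : List Int :=
  majorityLoopA chips start_offset []

-- ===== PORT B =====
-- n = (len(chips) - start_offset) // 3; sums = [0]*n;
-- for i, x in enumerate(chips[start_offset : start_offset + 3*n]): sums[i//3] += x;
-- return [1 if s >= 2 else 0 for s in sums]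
def majority_decode_triplets_alt (chips : List Int) (start_offset : Int) : List Int :=
  let n := PySem.Int.floordiv ((chips.length : Int) - start_offset) 3
  if n ≤ 0 then []
  else
    let seg := PySem.List.slice chips (some start_offset) (some (start_offset + 3 * n))
    let sums := (PySem.List.enumerate seg).foldl
      (fun sums p =>
        let j := (PySem.Int.floordiv p.1 3).toNat
        sums.set j (sums.getD j 0 + p.2))
      (List.replicate n.toNat 0)
    sums.map (fun s => if 2 ≤ s then (1 : Int) else 0)

-- ===== PRECONDITION & SPEC =====
-- Pre_ excludes negative start_offset, where Python's negative-slice semantics give both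
-- A's window slicing and B's segment slicing accidental, unspecified wraparound results.
def Pre_majority_decode_triplets (chips : List Int) (start_offset : Int) : Prop :=
  0 ≤ start_offset
instance (chips : List Int) (start_offset : Int) : Decidable (Pre_majority_decode_triplets chips start_offset) := by unfold Pre_majority_decode_triplets; infer_instance

def pvWitness_majority_decode_triplets : List Int × Int := ([1, 0, 1, 1, 1, 0, 0], 1)

def Spec_majority_decode_triplets (chips : List Int) (start_offset : Int) (out : List Int) : Prop := out = majority_decode_triplets_alt chips start_offset
instance (chips : List Int) (start_offset : Int) (out : List Int) : Decidable (Spec_majority_decode_triplets chips start_offset out) := by unfold Spec_majority_decode_triplets; infer_instance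

-- ===== CLAIM (what is proved, stated in full; the proofs are below) =====
def Claim_equal_majority_decode_triplets : Prop := ∀ (chips : List Int) (start_offset : Int), Dom_majority_decode_triplets chips start_offset → Pre_majority_decode_triplets chips start_offset → Spec_majority_decode_triplets chips start_offset (majority_decode_triplets chips start_offset)

-- ===== LEMMAS AND PROOFS =====

-- proof-side specification: one majority bit per complete leading triplet
def decodeSpec : List Int → List Int
  | a :: b :: c :: rest => (if 2 ≤ a + b + c then (1 : Int) else 0) :: decodeSpec rest
  | _ => []

-- per-triplet sums of complete leading triplets
def tripSums : List Int → List Int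
  | a :: b :: c :: rest => (a + b + c) :: tripSums rest
  | _ => []

theorem decodeSpec_short (l : List Int) (h : l.length < 3) : decodeSpec l = [] := by
  match l with
  | [] => rfl
  | [_] => rfl
  | [_, _] => rfl
  | _ :: _ :: _ :: _ => simp at h; omega

theorem decodeSpec_eq_map (l : List Int) :
    decodeSpec l = (tripSums l).map (fun s => if 2 ≤ s then (1 : Int) else 0) := by
  fun_induction tripSums l with
  | case1 a b c rest ih => simp [decodeSpec, ih]
  | case2 l h => cases l with
    | nil => rfl
    | cons a t => cases t with
      | nil => rfl
      | cons b u => cases u with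
        | nil => rfl
        | cons c v => exact absurd rfl (h a b c v)

theorem decodeSpec_append_short (seg tail : List Int) (m : Nat)
    (hseg : seg.length = 3 * m) (htail : tail.length < 3) :
    decodeSpec (seg ++ tail) = decodeSpec seg := by
  induction m generalizing seg with
  | zero =>
    have : seg = [] := by rw [← List.length_eq_zero_iff]; omega
    simp [this, decodeSpec_short tail htail, decodeSpec]
  | succ k ih =>
    match seg, hseg with
    | a :: b :: c :: rest, hseg =>
      simp only [List.cons_append, decodeSpec]
      rw [ih rest (by simp at hseg ⊢; omega)]

theorem majorityLoopA_eq (chips : List Int) (idx : Int) (decoded : List Int)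
    (hidx : 0 ≤ idx) :
    majorityLoopA chips idx decoded = decoded ++ decodeSpec (chips.drop idx.toNat) := by
  fun_induction majorityLoopA chips idx decoded with
  | case1 idx decoded h ih =>
    have h3 : 3 ≤ (chips.drop idx.toNat).length := by simp; omega
    obtain ⟨a, b, c, rest, hrest⟩ :
        ∃ a b c rest, chips.drop idx.toNat = a :: b :: c :: rest := by
      match hm : chips.drop idx.toNat with
      | a :: b :: c :: rest => exact ⟨a, b, c, rest, rfl⟩
      | [] | [_] | [_, _] => simp [hm] at h3
    have hslice : PySem.List.slice chips (some idx) (some (idx + 3))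
        = (chips.drop idx.toNat).take ((idx + 3).toNat - idx.toNat) :=
      PySem.List.slice_toNat chips hidx (by omega)
    have htn : (idx + 3).toNat - idx.toNat = 3 := by omega
    have hdrop : chips.drop (idx + 3).toNat = rest := by
      have : (idx + 3).toNat = idx.toNat + 3 := by omega
      rw [this, ← List.drop_drop, hrest]; rfl
    simp only [dite_eq_ite] at ih
    rw [ih (by omega), hslice, htn, hrest, hdrop]
    simp [decodeSpec, add_assoc]
  | case2 idx decoded h =>
    rw [decodeSpec_short]
    · simp
    · simp [List.length_drop]; omega

-- the fold of B accumulates exactly the per-triplet sums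
theorem foldSums (m : Nat) (seg : List Int) (hseg : seg.length = 3 * m)
    (done : List Int) :
    (PySem.List.enumerate seg ((3 * done.length : Nat) : Int)).foldl
      (fun sums p =>
        let j := (PySem.Int.floordiv p.1 3).toNat
        sums.set j (sums.getD j 0 + p.2))
      (done ++ List.replicate m 0)
    = done ++ tripSums seg := by
  induction m generalizing seg done with
  | zero =>
    have : seg = [] := by rw [← List.length_eq_zero_iff]; omega
    subst this
    simp [PySem.List.enumerate, tripSums]
  | succ k ih =>
    match seg, hseg with
    | a :: b :: c :: rest, hseg =>
      have hrest : rest.length = 3 * k := by simp at hseg; omega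
      have hdiv : ∀ (r : Int), 0 ≤ r → r < 3 →
          (PySem.Int.floordiv (((3 * done.length : Nat) : Int) + r) 3).toNat
            = done.length := by
        intro r h0 h2
        rw [PySem.Int.floordiv_eq_ediv_of_pos (by omega)]
        omega
      have hstep : ∀ (tail : List Int) (v x : Int),
          ((done ++ v :: tail).set done.length
            ((done ++ v :: tail).getD done.length 0 + x))
            = done ++ (v + x) :: tail := by
        intro tail v x
        have hg : (done ++ v :: tail).getD done.length 0 = v := by
          simp [List.getD]
        rw [hg, List.set_append_right _ _ (by omega)]
        simp
      simp only [PySem.List.enumerate_cons, List.foldl_cons, List.replicate_succ]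
      have h0 := hdiv 0 (by omega) (by omega)
      have h1 := hdiv 1 (by omega) (by omega)
      have h2 := hdiv 2 (by omega) (by omega)
      simp only [add_zero] at h0
      simp only [show (((3 * done.length : Nat) : Int) + 1 + 1)
          = ((3 * done.length : Nat) : Int) + 2 by ring] at *
      simp only [h0, h1, h2, hstep]
      have hcast : ((3 * done.length : Nat) : Int) + 2 + 1
          = ((3 * (done ++ [0 + a + b + c]).length : Nat) : Int) := by
        simp; push_cast; ring
      rw [hcast]
      have := ih rest hrest (done ++ [0 + a + b + c])
      simp only [List.append_assoc, List.cons_append, List.nil_append] at this ⊢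
      rw [this]
      simp [tripSums]

-- ===== VERDICT (by name: the statement is the Claim_ definition above) =====
theorem majority_decode_triplets_spec : Claim_equal_majority_decode_triplets := by
  intro chips s _hdom hpre
  have hs0 : (0:Int) ≤ s := hpre
  unfold Spec_majority_decode_triplets majority_decode_triplets
    majority_decode_triplets_alt
  rw [majorityLoopA_eq chips s [] hpre]
  simp only [List.nil_append]
  set n := PySem.Int.floordiv ((chips.length : Int) - s) 3 with hn
  have hediv : n = ((chips.length : Int) - s) / 3 :=
    PySem.Int.floordiv_eq_ediv_of_pos (by omega)
  by_cases hle : n ≤ 0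
  · rw [if_pos hle]
    exact decodeSpec_short _ (by simp; omega)
  · rw [if_neg hle]
    have hpos : 0 < n := by omega
    have hs3 : (0:Int) ≤ s + 3 * n := by omega
    have hslice : PySem.List.slice chips (some s) (some (s + 3 * n))
        = (chips.drop s.toNat).take ((s + 3 * n).toNat - s.toNat) :=
      PySem.List.slice_toNat chips hpre hs3
    have htn : (s + 3 * n).toNat - s.toNat = 3 * n.toNat := by omega
    have hlen3 : 3 * n.toNat ≤ (chips.drop s.toNat).length := by simp; omega
    have hseglen : ((chips.drop s.toNat).take (3 * n.toNat)).length
        = 3 * n.toNat := by simp; omega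
    have hsplit : chips.drop s.toNat
        = (chips.drop s.toNat).take (3 * n.toNat)
          ++ (chips.drop s.toNat).drop (3 * n.toNat) :=
      (List.take_append_drop _ _).symm
    have htail : ((chips.drop s.toNat).drop (3 * n.toNat)).length < 3 := by
      simp; omega
    rw [hslice, htn]
    have hfold := foldSums n.toNat ((chips.drop s.toNat).take (3 * n.toNat))
      hseglen []
    simp only [List.length_nil, Nat.mul_zero, Nat.cast_zero, List.nil_append]
      at hfold
    rw [hfold, ← decodeSpec_eq_map]
    conv_lhs => rw [hsplit]
    exact decodeSpec_append_short _ _ n.toNat hseglen htail
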